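-- pv_equiv track=rewrite | github.com/ramikhaldi/TOYOD | src/run.py | naive_retrieve
-- ===== SOURCE A (Python) =====
-- def naive_retrieve(user_query, documents, max_matches=3):
--     """
--     VERY naive retrieval: checks each doc for the presence of user_query keywords.
--     Returns top `max_matches` docs that contain the highest # of keyword hits.
--
--     For real usage:
--       - Switch to an embedding-based approach (e.g., sentence transformers).
--       - Split docs into smaller chunks.
--       - Use a vector database or a more robust retrieval method.
--     """
--
--     # Split query into simple keywords (lowercase, split on spaces)
--     query_keywords = user_query.lower().split()
--
--     scored_docs = []
--     for doc in documents:
--         # Naive scoring: count how many query keywords appear in the doc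
--         # This is extremely simplistic and can be improved drastically
--         doc_lower = doc.lower()
--         score = sum(doc_lower.count(keyword) for keyword in query_keywords)
--         scored_docs.append((score, doc))
--
--     # Sort docs by score descending
--     scored_docs.sort(key=lambda x: x[0], reverse=True)
--
--     # Return top `max_matches` docs that have a nonzero score
--     top_docs = [doc for (score, doc) in scored_docs if score > 0]
--     return top_docs[:max_matches]
-- ===== SOURCE B (Python) =====
-- def naive_retrieve(user_query, documents, max_matches=3):
--     # Group documents by score and walk the distinct scores in descending
--     # order; each group keeps the original document order, which reproduces
--     # the stable sort's tie order.
--     keywords = user_query.lower().split()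
--     scores = [sum(doc.lower().count(k) for k in keywords) for doc in documents]
--     ranked = []
--     for s in sorted(set(scores), reverse=True):
--         if s > 0:
--             ranked.extend(doc for doc, sc in zip(documents, scores) if sc == s)
--     return ranked[:max_matches]
-- ===== Notes on version B (the rewrite author's own statement) =====
-- stated objective: alternative
-- what changed: B replaces A's stable descending sort of (score, doc) pairs by a group-by-score walk: it computes the score list once, then iterates the distinct scores in descending order and collects each score's documents in original order, skipping score 0, and slices the result.
import Mathlib
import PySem

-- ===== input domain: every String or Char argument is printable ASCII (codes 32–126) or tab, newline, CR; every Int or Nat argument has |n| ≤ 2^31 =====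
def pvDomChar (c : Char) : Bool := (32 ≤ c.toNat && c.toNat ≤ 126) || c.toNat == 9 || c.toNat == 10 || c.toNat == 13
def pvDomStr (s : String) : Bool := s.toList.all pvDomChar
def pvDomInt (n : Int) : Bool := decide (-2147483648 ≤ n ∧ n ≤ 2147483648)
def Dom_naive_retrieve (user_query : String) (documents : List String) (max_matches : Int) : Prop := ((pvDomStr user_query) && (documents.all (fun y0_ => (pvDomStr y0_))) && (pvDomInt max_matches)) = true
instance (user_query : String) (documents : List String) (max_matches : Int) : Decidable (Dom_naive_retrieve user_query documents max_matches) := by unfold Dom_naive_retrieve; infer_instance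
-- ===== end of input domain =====

-- ===== PORT A =====
-- B groups documents by score and walks distinct scores in descending order instead of
-- stably sorting the scored list; same results (alternative decomposition, not faster).
def pvScore (keywords : List String) (doc : String) : Int :=
  (keywords.map (fun k => (PySem.Str.count (PySem.Str.lower doc) k : Int))).sum

def naive_retrieve (user_query : String) (documents : List String) (max_matches : Int) : List String :=
  let query_keywords := PySem.Str.split₀ (PySem.Str.lower user_query)
  let scored_docs := documents.foldl
    (fun acc doc => acc ++ [(pvScore query_keywords doc, doc)]) ([] : List (Int × String))
  let sorted_docs := PySem.List.sorted scored_docs (fun x => x.1) true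
  let top_docs := sorted_docs.foldl
    (fun acc p => if p.1 > 0 then acc ++ [p.2] else acc) ([] : List String)
  PySem.List.slice top_docs none (some max_matches)

-- ===== PORT B =====
def naive_retrieve_alt (user_query : String) (documents : List String) (max_matches : Int) : List String :=
  let keywords := PySem.Str.split₀ (PySem.Str.lower user_query)
  let scores := documents.map (fun doc => pvScore keywords doc)
  let ranked := (PySem.List.sorted (PySem.Set.ofList scores) (fun s => s) true).foldl
    (fun acc s => if s > 0 then
        acc ++ ((documents.zip scores).filter (fun p => p.2 == s)).map Prod.fst
      else acc) ([] : List String)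
  PySem.List.slice ranked none (some max_matches)

-- ===== PRECONDITION & SPEC =====
def Spec_naive_retrieve (user_query : String) (documents : List String) (max_matches : Int) (out : List String) : Prop := out = naive_retrieve_alt user_query documents max_matches
instance (user_query : String) (documents : List String) (max_matches : Int) (out : List String) : Decidable (Spec_naive_retrieve user_query documents max_matches out) := by unfold Spec_naive_retrieve; infer_instance

-- ===== CLAIM (what is proved, stated in full; the proofs are below) =====
def Claim_equal_naive_retrieve : Prop := ∀ (user_query : String) (documents : List String) (max_matches : Int), Dom_naive_retrieve user_query documents max_matches → Spec_naive_retrieve user_query documents max_matches (naive_retrieve user_query documents max_matches)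

-- ===== LEMMAS AND PROOFS =====

-- insertion predicate used by the reverse stable sort on (score, doc) pairs
def pvPr (a b : Int × String) : Bool := decide (b.1 < a.1)

lemma pv_insertBy_append {α : Type} (before : α → α → Bool) (x : α) (as bs : List α)
    (h : ∀ a ∈ as, before x a = false) :
    PySem.List.insertBy before x (as ++ bs) = as ++ PySem.List.insertBy before x bs := by
  induction as with
  | nil => rfl
  | cons a as ih =>
      have ha := h a (by simp)
      simp only [List.cons_append, PySem.List.insertBy, ha, Bool.false_eq_true, if_false]
      rw [ih (fun a ha => h a (by simp [ha]))]

lemma pv_insertBy_front {α : Type} (before : α → α → Bool) (x : α) (ys : List α)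
    (h : ∀ y ∈ ys, before x y = true) :
    PySem.List.insertBy before x ys = x :: ys := by
  cases ys with
  | nil => rfl
  | cons y ys => simp only [PySem.List.insertBy, h y (by simp), if_true]

lemma pv_flatMap_congr {α β : Type} (l : List α) (f g : α → List β)
    (h : ∀ a ∈ l, f a = g a) : l.flatMap f = l.flatMap g := by
  induction l with
  | nil => rfl
  | cons a l ih =>
      simp only [List.flatMap_cons, h a (by simp), ih (fun a ha => h a (by simp [ha]))]

-- insert a pair whose score already occurs among the groups: it lands at the end of its group
lemma pv_ins_mem (D : List Int) (g : Int → List (Int × String)) (p : Int × String)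
    (hD : D.Pairwise (fun a b => b < a)) (hk : p.1 ∈ D)
    (hg : ∀ s ∈ D, ∀ q ∈ g s, q.1 = s) :
    PySem.List.insertBy pvPr p (D.flatMap g)
      = D.flatMap (fun s => g s ++ if p.1 = s then [p] else []) := by
  induction D with
  | nil => cases hk
  | cons s D ih =>
      rcases List.pairwise_cons.mp hD with ⟨hs, hDt⟩
      simp only [List.flatMap_cons]
      by_cases hsk : p.1 = s
      · have skip : ∀ q ∈ g s, pvPr p q = false := by
          intro q hq
          have hq1 := hg s (by simp) q hq
          simp [pvPr, hq1, hsk]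
        rw [pv_insertBy_append _ _ _ _ skip]
        have front : ∀ q ∈ D.flatMap g, pvPr p q = true := by
          intro q hq
          rcases List.mem_flatMap.mp hq with ⟨s', hs', hqg⟩
          have hq1 := hg s' (by simp [hs']) q hqg
          have hlt : s' < s := hs s' hs'
          simp only [pvPr, hq1, hsk]
          exact decide_eq_true hlt
        rw [pv_insertBy_front _ _ _ front]
        have hrest : D.flatMap (fun t => g t ++ if p.1 = t then [p] else []) = D.flatMap g := by
          apply pv_flatMap_congr
          intro t ht
          have : p.1 ≠ t := by
            have := hs t ht; rw [hsk]; omega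
          simp [this]
        rw [hrest, if_pos hsk]
        simp
      · have hkD : p.1 ∈ D := by
          rcases List.mem_cons.mp hk with h | h
          · exact absurd h hsk
          · exact h
        have hlt : p.1 < s := hs _ hkD
        have skip : ∀ q ∈ g s, pvPr p q = false := by
          intro q hq
          have hq1 := hg s (by simp) q hq
          simp only [pvPr, hq1]
          simp
          omega
        rw [pv_insertBy_append _ _ _ _ skip,
          ih hDt hkD (fun t ht => hg t (by simp [ht]))]
        rw [if_neg hsk]
        simp

-- insert a pair with a fresh score: a new singleton group appears at the right place
lemma pv_ins_new (D : List Int) (g : Int → List (Int × String)) (p : Int × String)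
    (hD : D.Pairwise (fun a b => b < a)) (hk : p.1 ∉ D) (hgk : g p.1 = [])
    (hg : ∀ s ∈ D, ∀ q ∈ g s, q.1 = s) :
    PySem.List.insertBy pvPr p (D.flatMap g)
      = (PySem.List.insertBy (fun a b => decide (b < a)) p.1 D).flatMap
          (fun s => g s ++ if p.1 = s then [p] else []) := by
  induction D with
  | nil => simp [PySem.List.insertBy, hgk]
  | cons s D ih =>
      rcases List.pairwise_cons.mp hD with ⟨hs, hDt⟩
      have hne : p.1 ≠ s := fun h => hk (by simp [h])
      have hkD : p.1 ∉ D := fun h => hk (by simp [h])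
      by_cases hlt : s < p.1
      · have front : ∀ q ∈ (s :: D).flatMap g, pvPr p q = true := by
          intro q hq
          rcases List.mem_flatMap.mp hq with ⟨s', hs', hqg⟩
          have hq1 := hg s' hs' q hqg
          have hle : s' ≤ s := by
            rcases List.mem_cons.mp hs' with h | h
            · omega
            · exact le_of_lt (hs _ h)
          simp only [pvPr, hq1]
          exact decide_eq_true (by omega)
        rw [pv_insertBy_front _ _ _ front]
        have h2 : PySem.List.insertBy (fun a b => decide (b < a)) p.1 (s :: D)
            = p.1 :: s :: D := by
          simp [PySem.List.insertBy, hlt]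
        rw [h2]
        simp only [List.flatMap_cons, hgk, List.nil_append]
        simp only [if_true]
        simp only [List.singleton_append]
        congr 1
        congr 1
        · simp [hne]
        · symm
          apply pv_flatMap_congr
          intro t ht
          have : p.1 ≠ t := fun h => hkD (h ▸ ht)
          simp [this]
      · have hgt : p.1 < s := lt_of_le_of_ne (not_lt.mp hlt) hne
        have skip : ∀ q ∈ g s, pvPr p q = false := by
          intro q hq
          have hq1 := hg s (by simp) q hq
          simp only [pvPr, hq1]
          simp
          omega
        simp only [List.flatMap_cons]
        rw [pv_insertBy_append _ _ _ _ skip]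
        have h2 : PySem.List.insertBy (fun a b => decide (b < a)) p.1 (s :: D)
            = s :: PySem.List.insertBy (fun a b => decide (b < a)) p.1 D := by
          simp [PySem.List.insertBy]
          omega
        rw [h2, ih hDt hkD (fun t ht => hg t (by simp [ht]))]
        simp only [List.flatMap_cons]
        rw [if_neg hne]
        simp

lemma pv_sorted_scores_pairwise (l : List Int) :
    (PySem.List.sorted (PySem.Set.ofList l) (fun s => s) true).Pairwise (fun a b => b < a) := by
  have h1 := PySem.List.sorted_pairwise_rev (PySem.Set.ofList l) (fun s => s)
  have h2 : (PySem.List.sorted (PySem.Set.ofList l) (fun s => s) true).Nodup :=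
    ((PySem.List.sorted_perm (PySem.Set.ofList l) (fun s => s) true).nodup_iff).mpr
      (PySem.Set.nodup_ofList l)
  exact (h1.and h2).imp (fun h => lt_of_le_of_ne h.1 (Ne.symm h.2))

-- the stable descending sort is the walk of the distinct scores in descending order
lemma pv_group (xs : List (Int × String)) :
    PySem.List.sorted xs (fun x => x.1) true
      = (PySem.List.sorted (PySem.Set.ofList (xs.map Prod.fst)) (fun s => s) true).flatMap
          (fun s => xs.filter (fun q => q.1 == s)) := by
  induction xs using List.reverseRecOn with
  | nil => rfl
  | append_singleton xs p ih =>
      have hstep : PySem.List.sorted (xs ++ [p]) (fun x => x.1) true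
          = PySem.List.insertBy pvPr p (PySem.List.sorted xs (fun x => x.1) true) := by
        rw [PySem.List.sorted_rev_eq_foldl_insertBy, PySem.List.sorted_rev_eq_foldl_insertBy,
          List.foldl_append]
        rfl
      have hg : ∀ s ∈ PySem.List.sorted (PySem.Set.ofList (xs.map Prod.fst)) (fun s => s) true,
          ∀ q ∈ xs.filter (fun q => q.1 == s), q.1 = s := by
        intro s _ q hq
        exact beq_iff_eq.mp (List.mem_filter.mp hq).2
      have hmapp : (xs ++ [p]).map Prod.fst = xs.map Prod.fst ++ [p.1] := by simp
      have hfilt : ∀ s, (xs ++ [p]).filter (fun q => q.1 == s)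
          = xs.filter (fun q => q.1 == s) ++ if p.1 = s then [p] else [] := by
        intro s
        rw [List.filter_append]
        by_cases h : p.1 = s <;> simp [beq_iff_eq, h]
      rw [hstep, ih, hmapp, PySem.Set.ofList_append_singleton]
      by_cases hmem : p.1 ∈ xs.map Prod.fst
      · have hc : (PySem.Set.ofList (xs.map Prod.fst)).contains p.1 = true := by
          exact (PySem.Set.contains_iff _ _).mpr ((PySem.Set.mem_ofList _ _).mpr hmem)
        rw [show (PySem.Set.ofList (xs.map Prod.fst)).add p.1
            = PySem.Set.ofList (xs.map Prod.fst) by simp only [PySem.Set.add, hc, if_true]]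
        rw [pv_ins_mem _ _ _ (pv_sorted_scores_pairwise _)
          (((PySem.List.sorted_perm _ _ _).mem_iff).mpr ((PySem.Set.mem_ofList _ _).mpr hmem)) hg]
        symm
        apply pv_flatMap_congr
        intro s _
        rw [hfilt]
      · have hc : (PySem.Set.ofList (xs.map Prod.fst)).contains p.1 = false := by
          rw [Bool.eq_false_iff]
          intro h
          exact hmem ((PySem.Set.mem_ofList _ _).mp ((PySem.Set.contains_iff _ _).mp h))
        rw [show (PySem.Set.ofList (xs.map Prod.fst)).add p.1
            = PySem.Set.ofList (xs.map Prod.fst) ++ [p.1] by simp only [PySem.Set.add, hc, Bool.false_eq_true, if_false]]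
        have hDnew : PySem.List.sorted (PySem.Set.ofList (xs.map Prod.fst) ++ [p.1])
              (fun s => s) true
            = PySem.List.insertBy (fun a b => decide (b < a)) p.1
                (PySem.List.sorted (PySem.Set.ofList (xs.map Prod.fst)) (fun s => s) true) := by
          rw [PySem.List.sorted_rev_eq_foldl_insertBy, PySem.List.sorted_rev_eq_foldl_insertBy,
            List.foldl_append]
          rfl
        have hgk : xs.filter (fun q => q.1 == p.1) = [] := by
          rw [List.filter_eq_nil_iff]
          intro q hq hbeq
          exact hmem (List.mem_map.mpr ⟨q, hq, beq_iff_eq.mp hbeq⟩)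
        rw [hDnew, pv_ins_new _ _ _ (pv_sorted_scores_pairwise _)
          (fun h => hmem ((PySem.Set.mem_ofList _ _).mp (((PySem.List.sorted_perm _ _ _).mem_iff).mp h))) hgk hg]
        symm
        apply pv_flatMap_congr
        intro s _
        rw [hfilt]

lemma pv_fold_one (ys : List (Int × String)) (s : Int) (acc : List String)
    (h : ∀ q ∈ ys, q.1 = s) :
    ys.foldl (fun acc p => if p.1 > 0 then acc ++ [p.2] else acc) acc
      = if s > 0 then acc ++ ys.map Prod.snd else acc := by
  induction ys generalizing acc with
  | nil => by_cases hs : s > 0 <;> simp [hs]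
  | cons q ys ih =>
      have hq := h q (by simp)
      have ih' := fun acc => ih acc (fun q hq => h q (by simp [hq]))
      by_cases hs : s > 0 <;> simp [List.foldl_cons, hq, hs, ih']

lemma pv_fold_groups (D : List Int) (g : Int → List (Int × String)) (acc : List String)
    (hg : ∀ s ∈ D, ∀ q ∈ g s, q.1 = s) :
    (D.flatMap g).foldl (fun acc p => if p.1 > 0 then acc ++ [p.2] else acc) acc
      = D.foldl (fun acc s => if s > 0 then acc ++ (g s).map Prod.snd else acc) acc := by
  induction D generalizing acc with
  | nil => rfl
  | cons s D ih =>
      simp only [List.flatMap_cons, List.foldl_append, List.foldl_cons]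
      rw [pv_fold_one (g s) s acc (hg s (by simp)),
        ih _ (fun s hs => hg s (by simp [hs]))]

lemma pv_bucket (docs : List String) (f : String → Int) (s : Int) :
    ((docs.zip (docs.map f)).filter (fun p => p.2 == s)).map Prod.fst
      = ((docs.map (fun d => (f d, d))).filter (fun q => q.1 == s)).map Prod.snd := by
  have h1 : docs.zip (docs.map f) = docs.map (fun d => (d, f d)) := by
    induction docs with
    | nil => rfl
    | cons d docs ih => simp [ih]
  rw [h1, List.filter_map, List.filter_map, List.map_map, List.map_map]
  simp [Function.comp_def]

lemma pv_main (user_query : String) (documents : List String) (max_matches : Int) :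
    naive_retrieve user_query documents max_matches
      = naive_retrieve_alt user_query documents max_matches := by
  unfold naive_retrieve naive_retrieve_alt
  dsimp only
  rw [PySem.List.foldl_append_singleton_eq_map, List.nil_append]
  congr 1
  have hmap : (documents.map
      (fun doc => (pvScore (PySem.Str.split₀ (PySem.Str.lower user_query)) doc, doc))).map Prod.fst
      = documents.map (fun doc => pvScore (PySem.Str.split₀ (PySem.Str.lower user_query)) doc) := by
    rw [List.map_map]
    rfl
  rw [pv_group, hmap,
    pv_fold_groups _ _ _ (fun s _ q hq => beq_iff_eq.mp (List.mem_filter.mp hq).2)]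
  congr 1
  funext acc s
  rw [pv_bucket]


-- ===== VERDICT (by name: the statement is the Claim_ definition above) =====
theorem naive_retrieve_spec : Claim_equal_naive_retrieve := by
  intro user_query documents max_matches _
  unfold Spec_naive_retrieve
  exact pv_main user_query documents max_matches
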